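-- pv_equiv track=rewrite | github.com/maminadochka/examples_Python | hometask10/task1.py | find_first_numb
-- ===== SOURCE A (Python) =====
-- def find_first_numb(where_find):
--     n = where_find[::-1]
--     number = ""
--     for y in range(len(n)):
--         if n[y].isdigit():
--             number += n[y]
--         else:
--             break
--     return number[::-1]
-- ===== SOURCE B (Python) =====
-- def find_first_numb(where_find):
--     i = len(where_find)
--     while i > 0 and where_find[i - 1].isdigit():
--         i -= 1
--     return where_find[i:]
-- ===== Notes on version B (the rewrite author's own statement) =====
-- stated objective: simpler
-- what changed: Replaces the reverse-accumulate-reverse loop by a boundary-index scan from the end followed by a single slice, with no string copies or reversals.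
import Mathlib
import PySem

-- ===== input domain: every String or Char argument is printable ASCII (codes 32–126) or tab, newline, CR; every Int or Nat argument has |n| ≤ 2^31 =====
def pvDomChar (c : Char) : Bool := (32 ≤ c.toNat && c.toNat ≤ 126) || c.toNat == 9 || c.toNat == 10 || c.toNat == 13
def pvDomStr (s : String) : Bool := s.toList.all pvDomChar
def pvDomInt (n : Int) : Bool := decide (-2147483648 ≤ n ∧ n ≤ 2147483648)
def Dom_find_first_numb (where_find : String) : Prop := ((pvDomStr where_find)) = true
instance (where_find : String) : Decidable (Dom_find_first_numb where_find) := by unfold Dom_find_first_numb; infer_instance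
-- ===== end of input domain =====

-- ===== PORT A =====
-- A: reverse the string, accumulate leading digits of the reversal, reverse the accumulator.
def pvALoop (n : List Char) (acc : List Char) : List Char :=
  match n with
  | [] => acc
  | c :: rest => if PySem.Chars.isdigit c then pvALoop rest (acc ++ [c]) else acc

def find_first_numb (where_find : String) : String :=
  let n := where_find.toList.reverse
  let number := pvALoop n []
  String.ofList number.reverse

-- ===== PORT B =====
-- B: decrement a boundary index while the previous char is a digit, then slice once.
def pvBLoop (cs : List Char) : Nat → Nat
  | 0 => 0
  | i + 1 => if PySem.Chars.isdigit (cs.getD i ' ') then pvBLoop cs i else i + 1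

def find_first_numb_alt (where_find : String) : String :=
  let cs := where_find.toList
  let i := pvBLoop cs cs.length
  String.ofList (PySem.List.slice cs (some (i : Int)) none)

-- ===== PRECONDITION & SPEC =====
def Spec_find_first_numb (where_find : String) (out : String) : Prop := out = find_first_numb_alt where_find
instance (where_find : String) (out : String) : Decidable (Spec_find_first_numb where_find out) := by unfold Spec_find_first_numb; infer_instance

-- ===== CLAIM (what is proved, stated in full; the proofs are below) =====
def Claim_equal_find_first_numb : Prop := ∀ (where_find : String), Dom_find_first_numb where_find → Spec_find_first_numb where_find (find_first_numb where_find)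

-- ===== LEMMAS AND PROOFS =====
theorem pvALoop_eq (n acc : List Char) :
    pvALoop n acc = acc ++ n.takeWhile PySem.Chars.isdigit := by
  induction n generalizing acc with
  | nil => simp [pvALoop]
  | cons c rest ih =>
    simp only [pvALoop, List.takeWhile]
    by_cases h : PySem.Chars.isdigit c = true
    · simp [h, ih]
    · simp [h]

theorem pvBLoop_eq (cs : List Char) (i : Nat) (hi : i ≤ cs.length) :
    pvBLoop cs i = i - ((cs.take i).reverse.takeWhile PySem.Chars.isdigit).length := by
  induction i with
  | zero => simp [pvBLoop]
  | succ i ih =>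
    have hlt : i < cs.length := hi
    have hget : cs.getD i ' ' = cs[i] := List.getD_eq_getElem cs ' ' hlt
    have htake : (cs.take (i + 1)).reverse = cs[i] :: (cs.take i).reverse := by
      rw [List.take_add_one]
      simp [List.getElem?_eq_getElem hlt]
    simp only [pvBLoop, hget, htake, List.takeWhile]
    by_cases h : PySem.Chars.isdigit cs[i] = true
    · have hlen : ((cs.take i).reverse.takeWhile PySem.Chars.isdigit).length ≤ i := by
        calc ((cs.take i).reverse.takeWhile PySem.Chars.isdigit).length
            ≤ (cs.take i).reverse.length := (List.takeWhile_prefix _).length_le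
          _ ≤ i := by simp [List.length_take]
      simp only [h, if_true, List.length_cons]
      rw [ih (Nat.le_of_lt hlt)]
      omega
    · simp [h]

theorem find_first_numb_core (cs : List Char) :
    ((pvALoop cs.reverse []).reverse) = cs.drop (pvBLoop cs cs.length) := by
  rw [pvALoop_eq, pvBLoop_eq cs cs.length (le_refl _), List.take_length]
  have hpre : cs.reverse.takeWhile PySem.Chars.isdigit
      = cs.reverse.take (cs.reverse.takeWhile PySem.Chars.isdigit).length :=
    List.prefix_iff_eq_take.mp (List.takeWhile_prefix _)
  rw [List.nil_append, hpre, List.reverse_take]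
  have : (cs.reverse.takeWhile PySem.Chars.isdigit).length ≤ cs.length := by
    have h := (List.takeWhile_prefix (l := cs.reverse) PySem.Chars.isdigit).length_le; simpa using h
  simp [Nat.min_eq_left this]

-- ===== VERDICT (by name: the statement is the Claim_ definition above) =====
theorem find_first_numb_spec : Claim_equal_find_first_numb := by
  intro s _
  unfold Spec_find_first_numb find_first_numb find_first_numb_alt
  simp only [PySem.List.slice_from_natCast]
  rw [find_first_numb_core]
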